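-- pv_equiv track=rewrite | github.com/HongyuHe/leetcode-new-round | oa/az_matching_min_cost.py | find_min_price
-- ===== SOURCE A (Python) =====
-- def find_min_price(price):
--     #* Prefix sum + Hashmap for leftmost position.
--     lmost_positions = {}
--     best_costs = {}
--
--     MAX = float('inf')
--     best_cost = MAX
--     prefix_sums = [0] * (len(price)+1)
--
--     for i in range(len(price)):
--         amount = price[i]
--         prefix_sums[i+1] = prefix_sums[i] + amount
--         if amount not in lmost_positions:
--             best_costs[amount] = MAX
--         else:
--             #* Naive `sum(price[lmost_positions[cost]: i+1])` will cause TLE.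
--             new_cost = prefix_sums[i+1] - prefix_sums[lmost_positions[amount]]
--             best_costs[amount] = min(best_costs[amount], new_cost)
--             best_cost = min(best_costs[amount], best_cost)
--         lmost_positions[amount] = i
--
--     return best_cost if best_cost < MAX else -1
-- ===== SOURCE B (Python) =====
-- def find_min_price(price):
--     # Two-pass regrouped version: prefix sums + per-value index lists,
--     # then a grouped scan over consecutive occurrences of each value.
--     prefix = [0]
--     for x in price:
--         prefix.append(prefix[-1] + x)
--     positions = {}
--     for i, x in enumerate(price):
--         positions.setdefault(x, []).append(i)
--     best = None
--     for idxs in positions.values():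
--         for prev, cur in zip(idxs, idxs[1:]):
--             cost = prefix[cur + 1] - prefix[prev]
--             if best is None or cost < best:
--                 best = cost
--     return best if best is not None else -1
-- ===== Notes on version B (the rewrite author's own statement) =====
-- stated objective: alternative
-- what changed: Replaces A's single interleaved scan (per-value running best dict updated in lockstep with a global best) by two separate passes: build prefix sums and a value-to-index-list table, then take the minimum of prefix differences over consecutive occurrences within each value group.
import Mathlib
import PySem

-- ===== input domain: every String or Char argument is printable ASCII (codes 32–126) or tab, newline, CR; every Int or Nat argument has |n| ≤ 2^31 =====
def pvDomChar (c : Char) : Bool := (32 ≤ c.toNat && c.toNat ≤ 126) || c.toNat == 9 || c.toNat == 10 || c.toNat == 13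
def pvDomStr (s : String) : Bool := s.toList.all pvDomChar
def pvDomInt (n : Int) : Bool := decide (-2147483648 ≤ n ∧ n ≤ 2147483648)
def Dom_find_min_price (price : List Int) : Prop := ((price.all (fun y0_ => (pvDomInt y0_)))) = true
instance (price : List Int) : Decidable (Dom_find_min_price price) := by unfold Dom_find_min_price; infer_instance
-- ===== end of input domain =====

-- B replaces A's single interleaved scan by two passes: prefix sums + a value→index-list
-- table, then a grouped minimum over consecutive occurrences of each value (alternative
-- decomposition, same O(n) cost).

-- ===== PORT A =====
-- Python's float('inf') sentinel is modelled as `none`: every other value A compares or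
-- stores is an int, and min(·, inf) / the final `best_cost < MAX` test are exactly the
-- Option behaviour below (exact on the int domain; no floats are ever produced).
def pyMinInf : Option Int → Option Int → Option Int
  | none, b => b
  | some a, none => some a
  | some a, some b => some (min a b)

def StA : Type := PySem.Dict Int Int × PySem.Dict Int (Option Int) × Option Int × List Int

def initA (price : List Int) : StA :=
  (PySem.Dict.empty, PySem.Dict.empty, none,
   List.replicate (((price.length : Int)).toNat + 1) (0 : Int))

def findA_body (price : List Int) (st : StA) (i : Int) : StA :=
  let lmost := st.1
  let bests := st.2.1
  let best := st.2.2.1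
  let amount := PySem.List.pyGetD price i 0
  let prefix_sums := PySem.List.pySetD st.2.2.2 (i+1) (PySem.List.pyGetD st.2.2.2 i 0 + amount)
  if lmost.contains amount = false then
    (lmost.insert amount i, bests.insert amount none, best, prefix_sums)
  else
    let new_cost := PySem.List.pyGetD prefix_sums (i+1) 0 -
      PySem.List.pyGetD prefix_sums (lmost.getD amount 0) 0
    let bv := pyMinInf (bests.getD amount none) (some new_cost)
    (lmost.insert amount i, bests.insert amount bv, pyMinInf bv best, prefix_sums)

def find_min_price (price : List Int) : Int :=
  let n : Int := price.length
  match ((PySem.List.pyRange 0 n 1).foldl (findA_body price) (initA price)).2.2.1 with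
  | some b => b
  | none => -1

-- ===== PORT B =====
def find_min_price_alt (price : List Int) : Int :=
  let pfxs := price.foldl (fun acc x => acc ++ [PySem.List.pyGetD acc (-1) 0 + x]) [(0:Int)]
  let positions := (PySem.List.enumerate price).foldl
      (fun d p => d.modify p.2 [] (fun l => l ++ [p.1]))
      (PySem.Dict.empty : PySem.Dict Int (List Int))
  let best := positions.values.foldl (fun best idxs =>
      (idxs.zip (PySem.List.slice idxs (some 1) none)).foldl (fun best pc =>
        let cost := PySem.List.pyGetD pfxs (pc.2 + 1) 0 - PySem.List.pyGetD pfxs pc.1 0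
        match best with
        | none => some cost
        | some b => if cost < b then some cost else some b) best) (none : Option Int)
  match best with
  | some b => b
  | none => -1

-- ===== PRECONDITION & SPEC =====
def Spec_find_min_price (price : List Int) (out : Int) : Prop := out = find_min_price_alt price
instance (price : List Int) (out : Int) : Decidable (Spec_find_min_price price out) := by unfold Spec_find_min_price; infer_instance

-- ===== CLAIM (what is proved, stated in full; the proofs are below) =====
def Claim_equal_find_min_price : Prop := ∀ (price : List Int), Dom_find_min_price price → Spec_find_min_price price (find_min_price price)

-- ===== LEMMAS AND PROOFS =====

-- proof-layer vocabulary
def retI : Option Int → Int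
  | some b => b
  | none => -1

def ominS (b : Option Int) (c : Int) : Option Int := pyMinInf b (some c)

def pfxL (l : List Int) : List Int :=
  (List.range (l.length + 1)).map (fun j => (l.take j).sum)

def occI (l : List Int) (v : Int) : List Int :=
  ((PySem.List.enumerate l).filter (fun p => p.2 == v)).map (fun p => p.1)

def cpairs (xs : List Int) : List (Int × Int) := xs.zip xs.tail

def pcost (full : List Int) (pc : Int × Int) : Int :=
  ((full.take (pc.2.toNat + 1)).drop pc.1.toNat).sum

def tailOpt (q? : Option Int) (k : Int) : List (Int × Int) :=
  match q? with
  | some q => [(q, k)]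
  | none => []

def stepI (st : List Int × List (Int × Int)) (x : Int) : List Int × List (Int × Int) :=
  (st.1 ++ [x], st.2 ++ tailOpt ((occI st.1 x).getLast?) (st.1.length : Int))

def ipairs (l : List Int) : List (Int × Int) := (l.foldl stepI ([], [])).2

def gpairs (l : List Int) : List (Int × Int) :=
  (PySem.Set.ofList l).flatMap (fun v => cpairs (occI l v))

def gmin (full l : List Int) (v : Int) : Option Int :=
  ((cpairs (occI l v)).map (pcost full)).foldl ominS none

def bodyA (st : StA) (i x : Int) : StA :=
  let lmost := st.1
  let bests := st.2.1
  let best := st.2.2.1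
  let prefix_sums := PySem.List.pySetD st.2.2.2 (i+1) (PySem.List.pyGetD st.2.2.2 i 0 + x)
  if lmost.contains x = false then
    (lmost.insert x i, bests.insert x none, best, prefix_sums)
  else
    let new_cost := PySem.List.pyGetD prefix_sums (i+1) 0 -
      PySem.List.pyGetD prefix_sums (lmost.getD x 0) 0
    let bv := pyMinInf (bests.getD x none) (some new_cost)
    (lmost.insert x i, bests.insert x bv, pyMinInf bv best, prefix_sums)

def RelLe (b bv : Option Int) : Prop := ∀ c, bv = some c → ∃ a, b = some a ∧ a ≤ c

def InvA (price l : List Int) (st : StA) : Prop :=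
  st.2.2.2 = pfxL l ++ List.replicate (price.length - l.length) 0
  ∧ (∀ v, st.1.get? v = (occI l v).getLast?)
  ∧ (∀ v, st.2.1.getD v none = gmin price l v)
  ∧ st.2.2.1 = ((ipairs l).map (pcost price)).foldl ominS none
  ∧ (∀ v, RelLe st.2.2.1 (st.2.1.getD v none))

-- basic facts
lemma enumerate_append_singleton {α : Type} (l : List α) (x : α) (s : Int) :
    PySem.List.enumerate (l ++ [x]) s
      = PySem.List.enumerate l s ++ [(s + l.length, x)] := by
  induction l generalizing s with
  | nil => simp [PySem.List.enumerate_cons, PySem.List.enumerate]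
  | cons a t ih =>
    simp only [List.cons_append, PySem.List.enumerate_cons, ih, List.length_cons]
    rw [show s + 1 + (t.length : Int) = s + ((t.length + 1 : Nat) : Int) by push_cast; ring]


lemma mem_enumerate_spec {α : Type} (l : List α) (s : Int) (p : Int × α)
    (hp : p ∈ PySem.List.enumerate l s) :
    ∃ j : Nat, j < l.length ∧ p.1 = s + j ∧ l[j]? = some p.2 := by
  induction l generalizing s with
  | nil => simp [PySem.List.enumerate] at hp
  | cons a t ih =>
    rw [PySem.List.enumerate_cons] at hp
    rcases List.mem_cons.mp hp with h | h
    · exact ⟨0, by simp [h]⟩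
    · obtain ⟨j, hj, h1, h2⟩ := ih (s+1) h
      refine ⟨j+1, by simp; omega, ?_, by simpa using h2⟩
      push_cast; omega


lemma occI_append (l : List Int) (x v : Int) :
    occI (l ++ [x]) v = occI l v ++ (if x = v then [(l.length : Int)] else []) := by
  unfold occI
  rw [enumerate_append_singleton, List.filter_append, List.map_append]
  by_cases hxv : x = v <;> simp [hxv]


lemma occI_mem_spec (l : List Int) (v q : Int) (hq : q ∈ occI l v) :
    ∃ j : Nat, q = (j : Int) ∧ j < l.length := by
  unfold occI at hq
  obtain ⟨p, hp, rfl⟩ := List.mem_map.mp hq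
  obtain ⟨j, hj, h1, _⟩ := mem_enumerate_spec l 0 p (List.mem_of_mem_filter hp)
  exact ⟨j, by omega, hj⟩


lemma occI_ne_nil_iff (l : List Int) (v : Int) : occI l v ≠ [] ↔ v ∈ l := by
  induction l using List.reverseRecOn with
  | nil => simp [occI, PySem.List.enumerate]
  | append_singleton l x ih =>
    rw [occI_append]
    by_cases hxv : x = v
    · simp [hxv]
    · simp only [hxv, if_false, List.append_nil, ih, List.mem_append, List.mem_singleton]
      exact ⟨Or.inl, fun h => h.resolve_right (fun e => hxv e.symm)⟩


lemma occI_pairwise (l : List Int) (v : Int) : (occI l v).Pairwise (· < ·) := by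
  have h1 : (PySem.List.enumerate l 0).Pairwise (fun a b => a.1 < b.1) := by
    have h := PySem.List.pairwise_lt_pyRange_one 0 (0 + l.length)
    rw [← PySem.List.map_fst_enumerate l 0] at h
    exact List.pairwise_map.mp h
  exact List.pairwise_map.mpr (List.Pairwise.sublist List.filter_sublist h1)


lemma cpairs_append (ys : List Int) (i : Int) :
    cpairs (ys ++ [i]) = cpairs ys ++ tailOpt ys.getLast? i := by
  induction ys with
  | nil => rfl
  | cons a t ih =>
    cases t with
    | nil => rfl
    | cons b t' =>
      simp only [List.cons_append, cpairs, List.zip_cons_cons, List.tail_cons] at *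
      rw [List.getLast?_cons_cons]
      simpa using ih


lemma mem_cpairs_lt (xs : List Int) (h : xs.Pairwise (· < ·)) (pc : Int × Int)
    (hm : pc ∈ cpairs xs) : pc.1 < pc.2 := by
  induction xs with
  | nil => simp [cpairs] at hm
  | cons a t ih =>
    cases t with
    | nil => simp [cpairs] at hm
    | cons b t' =>
      simp only [cpairs, List.tail_cons, List.zip_cons_cons, List.mem_cons] at hm
      rcases hm with rfl | hm
      · exact (List.pairwise_cons.mp h).1 b (by simp)
      · exact ih (List.pairwise_cons.mp h).2 hm


lemma mem_cpairs_mem (xs : List Int) (pc : Int × Int) (hm : pc ∈ cpairs xs) :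
    pc.1 ∈ xs ∧ pc.2 ∈ xs := by
  obtain ⟨a, b⟩ := pc
  obtain ⟨h1, h2⟩ := List.of_mem_zip hm
  exact ⟨h1, List.mem_of_mem_tail h2⟩


-- prefix-sum list facts
lemma pfxL_length (l : List Int) : (pfxL l).length = l.length + 1 := by
  simp [pfxL]

lemma pfxL_getElem (full : List Int) (j : Nat) (h : j < full.length + 1) :
    (pfxL full)[j]'(by simpa [pfxL_length] using h) = (full.take j).sum := by
  simp [pfxL]


lemma pfxL_getLast? (l : List Int) : (pfxL l).getLast? = some l.sum := by
  rw [List.getLast?_eq_getElem?, pfxL_length]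
  simp [pfxL, List.take_of_length_le]


lemma pfxL_append (l : List Int) (x : Int) : pfxL (l ++ [x]) = pfxL l ++ [l.sum + x] := by
  unfold pfxL
  rw [show (l ++ [x]).length + 1 = (l.length + 1) + 1 by simp, List.range_succ, List.map_append]
  congr 1
  · apply List.map_congr_left
    intro j hj
    rw [List.take_append_of_le_length (by simpa using Nat.lt_succ_iff.mp (List.mem_range.mp hj))]
  · simp [List.take_of_length_le (by simp : (l ++ [x]).length ≤ l.length + 1)]


lemma pfxL_read (full : List Int) (j : Int) (h0 : 0 ≤ j) (h1 : j.toNat ≤ full.length) :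
    PySem.List.pyGetD (pfxL full) j 0 = (full.take j.toNat).sum := by
  rw [PySem.List.pyGetD_eq_getElem (pfxL full) 0 h0
      (by rw [pfxL_length]; push_cast; omega)]
  exact pfxL_getElem full j.toNat (by omega)


lemma pfxB_eq (price : List Int) :
    price.foldl (fun acc x => acc ++ [PySem.List.pyGetD acc (-1) 0 + x]) [(0:Int)]
      = pfxL price := by
  induction price using List.reverseRecOn with
  | nil => simp [pfxL]
  | append_singleton l x ih =>
    rw [List.foldl_append, ih]
    simp only [List.foldl_cons, List.foldl_nil]
    have hne : pfxL l ≠ [] := by simp [← List.length_pos_iff, pfxL_length]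
    rw [PySem.List.pyGetD_neg_one (pfxL l) 0 hne]
    have h := List.getLast?_eq_some_getLast hne
    rw [pfxL_getLast?] at h
    rw [pfxL_append, ← Option.some_inj.mp h]


lemma pcost_eq_sub (full : List Int) (p c : Int) (_h0 : 0 ≤ p) (hpc : p ≤ c) :
    pcost full (p, c) = (full.take (c.toNat + 1)).sum - (full.take p.toNat).sum := by
  show ((full.take (c.toNat + 1)).drop p.toNat).sum = _
  have h := List.sum_take_add_sum_drop (full.take (c.toNat + 1)) p.toNat
  rw [List.take_take] at h
  rw [show min p.toNat (c.toNat + 1) = p.toNat by omega] at h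
  omega


-- ipairs recursion
lemma foldl_stepI_fst (l : List Int) (st : List Int × List (Int × Int)) :
    (l.foldl stepI st).1 = st.1 ++ l := by
  induction l generalizing st with
  | nil => simp
  | cons a t ih =>
    rw [List.foldl_cons, ih]
    simp [stepI]


lemma ipairs_append (l : List Int) (x : Int) :
    ipairs (l ++ [x]) = ipairs l ++ tailOpt ((occI l x).getLast?) (l.length : Int) := by
  unfold ipairs
  rw [List.foldl_append]
  simp only [List.foldl_cons, List.foldl_nil]
  have hfst : (l.foldl stepI ([], [])).1 = l := by simpa using foldl_stepI_fst l ([], [])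
  simp [stepI, hfst]


-- the permutation between index-ordered and grouped pairs
lemma flatMap_add_perm (p : Int × Int) (f : Int → List (Int × Int)) (x : Int) :
    ∀ keys : List Int, keys.Nodup → x ∈ keys →
      (keys.flatMap (fun v => f v ++ if v = x then [p] else [])).Perm
        (keys.flatMap f ++ [p]) := by
  have swap : ∀ (A B : List (Int × Int)), ((A ++ [p]) ++ B).Perm ((A ++ B) ++ [p]) := by
    intro A B
    refine List.perm_iff_count.mpr fun a => ?_
    simp [List.count_append, List.count_cons]
  intro keys
  induction keys with
  | nil => intro _ h; simp at h
  | cons k ks ih =>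
    intro hnd hx
    simp only [List.flatMap_cons]
    by_cases hk : k = x
    · subst hk
      have hnotin : k ∉ ks := (List.nodup_cons.mp hnd).1
      have hcongr : ks.flatMap (fun v => f v ++ if v = k then [p] else []) = ks.flatMap f :=
        List.flatMap_congr (fun v hv => by
          rw [if_neg (by rintro rfl; exact hnotin hv), List.append_nil])
      rw [if_pos rfl, hcongr]
      exact swap _ _
    · have hx' : x ∈ ks := by
        rcases List.mem_cons.mp hx with h | h
        · exact absurd h.symm hk
        · exact h
      rw [if_neg hk]
      have h := ih (List.nodup_cons.mp hnd).2 hx'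
      simpa [List.append_assoc] using h.append_left (f k)


lemma ipairs_perm_gpairs (l : List Int) : (ipairs l).Perm (gpairs l) := by
  induction l using List.reverseRecOn with
  | nil => rfl
  | append_singleton l x ih =>
    rw [ipairs_append]
    by_cases hx : x ∈ l
    · have hne : occI l x ≠ [] := (occI_ne_nil_iff l x).mpr hx
      obtain ⟨q, hq⟩ : ∃ q, (occI l x).getLast? = some q := by
        cases h' : (occI l x).getLast? with
        | none => exact absurd (List.getLast?_eq_none_iff.mp h') hne
        | some q => exact ⟨q, rfl⟩
      rw [hq]
      show (ipairs l ++ [(q, (l.length : Int))]).Perm _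
      have hset : PySem.Set.ofList (l ++ [x]) = PySem.Set.ofList l := by
        rw [PySem.Set.ofList_append_singleton,
            PySem.Set.add_of_mem ((PySem.Set.mem_ofList l x).mpr hx)]
      have hflat : gpairs (l ++ [x]) = (PySem.Set.ofList l).flatMap
          (fun v => cpairs (occI l v) ++ if v = x then [(q, (l.length : Int))] else []) := by
        unfold gpairs
        rw [hset]
        refine List.flatMap_congr fun v hv => ?_
        rw [occI_append]
        by_cases hvx : v = x
        · subst hvx
          rw [if_pos rfl, if_pos rfl, cpairs_append, hq]
          rfl
        · rw [if_neg (fun e => hvx e.symm), if_neg hvx, List.append_nil, List.append_nil]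
      rw [hflat]
      exact (ih.append_right _).trans
        (flatMap_add_perm (q, (l.length : Int)) (fun v => cpairs (occI l v)) x
          (PySem.Set.ofList l) (PySem.Set.nodup_ofList l)
          ((PySem.Set.mem_ofList l x).mpr hx)).symm
    · have hocc : occI l x = [] := not_ne_iff.mp (mt (occI_ne_nil_iff l x).mp hx)
      rw [List.getLast?_eq_none_iff.mpr hocc]
      show (ipairs l ++ []).Perm _
      rw [List.append_nil]
      have hg : gpairs (l ++ [x]) = gpairs l := by
        unfold gpairs
        rw [PySem.Set.ofList_append_singleton,
            PySem.Set.add_of_not_mem (fun h => hx ((PySem.Set.mem_ofList l x).mp h)),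
            List.flatMap_append]
        have h2 : [x].flatMap (fun v => cpairs (occI (l ++ [x]) v)) = [] := by
          simp only [List.flatMap_cons, List.flatMap_nil, List.append_nil]
          rw [occI_append, hocc, if_pos rfl, List.nil_append]
          rfl
        rw [h2, List.append_nil]
        refine List.flatMap_congr fun v hv => ?_
        have hvx : v ≠ x := fun e => hx (e ▸ (PySem.Set.mem_ofList l v).mp hv)
        rw [occI_append, if_neg (fun e => hvx e.symm), List.append_nil]
      rw [hg]
      exact ih


lemma pfxPad_read (m : List Int) (r : Nat) (j : Int) (h0 : 0 ≤ j) (h1 : j.toNat ≤ m.length) :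
    PySem.List.pyGetD (pfxL m ++ List.replicate r (0:Int)) j 0 = (m.take j.toNat).sum := by
  rw [PySem.List.pyGetD_eq_getElem _ 0 h0
      (by rw [List.length_append, pfxL_length, List.length_replicate]; push_cast; omega)]
  rw [List.getElem_append_left (by rw [pfxL_length]; omega)]
  exact pfxL_getElem m j.toNat (by omega)

lemma prefix_update (n : Nat) (l : List Int) (x : Int) (hlen : l.length + 1 ≤ n) :
    PySem.List.pySetD (pfxL l ++ List.replicate (n - l.length) (0:Int)) ((l.length : Int) + 1)
      (PySem.List.pyGetD (pfxL l ++ List.replicate (n - l.length) (0:Int)) (l.length : Int) 0 + x)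
    = pfxL (l ++ [x]) ++ List.replicate (n - (l.length + 1)) 0 := by
  rw [pfxPad_read l _ (l.length : Int) (by omega) (by omega), Int.toNat_natCast, List.take_length]
  rw [PySem.List.pySetD_of_nonneg _ _ (by omega)]
  rw [show ((l.length : Int) + 1).toNat = l.length + 1 by omega]
  rw [List.set_append, if_neg (by rw [pfxL_length]; omega)]
  rw [show n - l.length = (n - (l.length + 1)) + 1 by omega, List.replicate_succ]
  rw [pfxL_length, show l.length + 1 - (l.length + 1) = 0 by omega, List.set_cons_zero]
  rw [pfxL_append, List.append_cons (pfxL l) (l.sum + x)]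

lemma minInf_absorb (g be : Option Int) (nc : Int) (hrel : RelLe be g) :
    pyMinInf (pyMinInf g (some nc)) be = ominS be nc := by
  cases g with
  | none => cases be <;> simp [pyMinInf, ominS, min_comm]
  | some c =>
    obtain ⟨a, hbe, hle⟩ := hrel c rfl
    subst hbe
    show some (min (min c nc) a) = some (min a nc)
    congr 1
    omega

lemma relLe_step1 (g be : Option Int) (nc : Int) (h : RelLe be g) :
    RelLe (ominS be nc) (pyMinInf g (some nc)) := by
  intro c hc
  cases g with
  | none =>
    cases be with
    | none => exact ⟨nc, rfl, by simp [pyMinInf] at hc; omega⟩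
    | some a => exact ⟨min a nc, rfl, by simp [pyMinInf] at hc; omega⟩
  | some c0 =>
    obtain ⟨a, hbe, hle⟩ := h c0 rfl
    subst hbe
    simp only [pyMinInf, Option.some.injEq] at hc
    exact ⟨min a nc, rfl, by omega⟩

lemma relLe_step2 (w be : Option Int) (nc : Int) (h : RelLe be w) :
    RelLe (ominS be nc) w := by
  intro c hc
  obtain ⟨a, hbe, hle⟩ := h c hc
  subst hbe
  exact ⟨min a nc, rfl, by omega⟩

-- A-side loop invariant
lemma bodyA_inv (price l : List Int) (x : Int) (hpre : (l ++ [x]) <+: price) (st : StA)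
    (h : InvA price l st) : InvA price (l ++ [x]) (bodyA st (l.length : Int) x) := by
  obtain ⟨lm, bs, be, ps⟩ := st
  obtain ⟨hpfx, hlm, hbst, hbest, hrel⟩ := h
  dsimp only at hpfx hlm hbst hbest hrel
  have hlen : l.length + 1 ≤ price.length := by
    have := hpre.length_le
    simpa using this
  have htake : price.take (l.length + 1) = l ++ [x] := by
    obtain ⟨t, ht⟩ := hpre
    rw [← ht, show l.length + 1 = (l ++ [x]).length by simp, List.take_left]
  unfold bodyA
  dsimp only
  rw [hpfx, prefix_update price.length l x hlen]
  by_cases hxl : x ∈ l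
  · -- repeated value: the else branch fires
    obtain ⟨q, hq⟩ : ∃ q, (occI l x).getLast? = some q := by
      cases h' : (occI l x).getLast? with
      | none => exact absurd (List.getLast?_eq_none_iff.mp h') ((occI_ne_nil_iff l x).mpr hxl)
      | some q => exact ⟨q, rfl⟩
    have hcontains : lm.contains x = true := by
      rw [PySem.Dict.contains_eq_isSome_get?, hlm x, hq]
      rfl
    rw [if_neg (by simp [hcontains])]
    have hgetD : lm.getD x 0 = q := by
      rw [PySem.Dict.getD_eq_get?_getD, hlm x, hq]
      rfl
    rw [hgetD]
    have hqmem : q ∈ occI l x := List.mem_of_getLast? hq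
    obtain ⟨j, hqj, hjl⟩ := occI_mem_spec l x q hqmem
    have hr1 : PySem.List.pyGetD (pfxL (l ++ [x]) ++
        List.replicate (price.length - (l.length + 1)) 0) ((l.length : Int) + 1) 0
        = l.sum + x := by
      rw [show ((l.length : Int) + 1) = (((l.length + 1 : Nat)) : Int) by push_cast; ring]
      rw [pfxPad_read _ _ _ (by omega) (by simp), Int.toNat_natCast]
      rw [show l.length + 1 = (l ++ [x]).length by simp, List.take_length]
      simp
    have hr2 : PySem.List.pyGetD (pfxL (l ++ [x]) ++
        List.replicate (price.length - (l.length + 1)) 0) q 0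
        = (l.take q.toNat).sum := by
      rw [pfxPad_read _ _ q (by omega) (by simp; omega)]
      rw [List.take_append_of_le_length (by omega)]
    rw [hr1, hr2]
    have hnc : l.sum + x - (l.take q.toNat).sum = pcost price (q, (l.length : Int)) := by
      unfold pcost
      dsimp only
      rw [show ((l.length : Int)).toNat = l.length by omega, htake]
      have hs := List.sum_take_add_sum_drop (l ++ [x]) q.toNat
      rw [List.take_append_of_le_length (by omega)] at hs
      rw [List.sum_append] at hs
      simp at hs ⊢
      omega
    rw [hnc]
    unfold InvA
    dsimp only
    refine ⟨by simp, ?_, ?_, ?_, ?_⟩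
    · intro v
      rw [PySem.Dict.get?_insert]
      by_cases hvx : v = x
      · subst hvx
        rw [if_pos rfl, occI_append, if_pos rfl, List.getLast?_append]
        rfl
      · rw [if_neg hvx, hlm v, occI_append, if_neg (fun e => hvx e.symm), List.append_nil]
    · intro v
      rw [PySem.Dict.getD_insert]
      by_cases hvx : v = x
      · subst hvx
        rw [if_pos rfl]
        unfold gmin
        rw [occI_append, if_pos rfl, cpairs_append, hq]
        simp only [tailOpt, List.map_append, List.foldl_append, List.map_cons, List.map_nil,
          List.foldl_cons, List.foldl_nil]
        rw [hbst v]
        rfl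
      · rw [if_neg hvx, hbst v]
        unfold gmin
        rw [occI_append, if_neg (fun e => hvx e.symm), List.append_nil]
    · rw [ipairs_append, hq]
      simp only [tailOpt, List.map_append, List.foldl_append, List.map_cons, List.map_nil,
        List.foldl_cons, List.foldl_nil]
      rw [← hbest]
      exact minInf_absorb _ _ _ (hrel x)
    · intro v
      rw [PySem.Dict.getD_insert, minInf_absorb _ _ _ (hrel x)]
      by_cases hvx : v = x
      · rw [if_pos hvx]
        exact relLe_step1 _ _ _ (hrel x)
      · rw [if_neg hvx]
        exact relLe_step2 _ _ _ (hrel v)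
  · -- first occurrence: the then branch fires
    have hocc : occI l x = [] := not_ne_iff.mp (mt (occI_ne_nil_iff l x).mp hxl)
    have hcontains : lm.contains x = false := by
      rw [PySem.Dict.contains_eq_isSome_get?, hlm x, hocc]
      rfl
    rw [if_pos (by simp [hcontains])]
    unfold InvA
    dsimp only
    refine ⟨by simp, ?_, ?_, ?_, ?_⟩
    · intro v
      rw [PySem.Dict.get?_insert]
      by_cases hvx : v = x
      · subst hvx
        rw [if_pos rfl, occI_append, if_pos rfl, hocc, List.nil_append]
        rfl
      · rw [if_neg hvx, hlm v, occI_append, if_neg (fun e => hvx e.symm), List.append_nil]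
    · intro v
      rw [PySem.Dict.getD_insert]
      by_cases hvx : v = x
      · subst hvx
        rw [if_pos rfl]
        unfold gmin
        rw [occI_append, if_pos rfl, hocc, List.nil_append]
        rfl
      · rw [if_neg hvx, hbst v]
        unfold gmin
        rw [occI_append, if_neg (fun e => hvx e.symm), List.append_nil]
    · rw [ipairs_append, List.getLast?_eq_none_iff.mpr hocc]
      simp only [tailOpt, List.append_nil]
      exact hbest
    · intro v
      rw [PySem.Dict.getD_insert]
      by_cases hvx : v = x
      · rw [if_pos hvx]
        intro c hc
        simp at hc
      · rw [if_neg hvx]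
        exact hrel v


lemma foldA_inv (price : List Int) : ∀ l, l <+: price →
    InvA price l ((PySem.List.enumerate l).foldl (fun st p => bodyA st p.1 p.2) (initA price)) := by
  intro l
  induction l using List.reverseRecOn with
  | nil =>
    intro _
    simp only [show PySem.List.enumerate ([] : List Int) = [] from rfl, List.foldl_nil]
    unfold InvA initA
    dsimp only
    refine ⟨?_, ?_, ?_, rfl, ?_⟩
    · show List.replicate ((price.length : Int).toNat + 1) (0:Int)
        = pfxL [] ++ List.replicate (price.length - [].length) 0
      rw [Int.toNat_natCast]
      simp [pfxL, List.replicate_succ]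
    · intro v
      rw [PySem.Dict.get?_empty]
      rfl
    · intro v
      rw [PySem.Dict.getD_empty]
      rfl
    · intro v c hc
      rw [PySem.Dict.getD_empty] at hc
      simp at hc
  | append_singleton l x ih =>
    intro hpre
    rw [enumerate_append_singleton, List.foldl_append]
    simp only [List.foldl_cons, List.foldl_nil]
    have h1 := ih ((List.prefix_append l [x]).trans hpre)
    have h2 := bodyA_inv price l x hpre _ h1
    simpa using h2


lemma A_eq (price : List Int) :
    find_min_price price = retI (((ipairs price).map (pcost price)).foldl ominS none) := by
  have hr : PySem.List.pyRange 0 ((price.length : Int)) 1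
      = (PySem.List.enumerate price).map (fun p => p.1) := by
    rw [PySem.List.map_fst_enumerate price 0, zero_add]
  have hconv : (PySem.List.pyRange 0 ((price.length : Int)) 1).foldl (findA_body price) (initA price)
      = (PySem.List.enumerate price).foldl (fun st p => bodyA st p.1 p.2) (initA price) := by
    rw [hr, List.foldl_map]
    refine PySem.List.foldl_congr_mem _ _ _ _ ?_
    intro st p hp
    obtain ⟨j, hj, h1, h2⟩ := mem_enumerate_spec price 0 p hp
    show findA_body price st p.1 = bodyA st p.1 p.2
    have hx : PySem.List.pyGetD price p.1 0 = p.2 := by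
      rw [h1, zero_add, PySem.List.pyGetD_natCast]
      simp [List.getD, h2]
    unfold findA_body bodyA
    rw [hx]
  unfold find_min_price
  dsimp only
  rw [hconv, (foldA_inv price price List.prefix_rfl).2.2.2.1]
  rfl


lemma innerB_eq (b : Option Int) (c : Int) :
    (match b with
      | none => some c
      | some a => if c < a then some c else some a) = ominS b c := by
  cases b with
  | none => rfl
  | some a =>
    by_cases h : c < a
    · simp [ominS, pyMinInf, h, min_def]
    · simp [ominS, pyMinInf, h, (by omega : a ≤ c)]

lemma B_eq (price : List Int) :
    find_min_price_alt price = retI (((gpairs price).map (pcost price)).foldl ominS none) := by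
  unfold find_min_price_alt
  simp only [pfxB_eq, PySem.List.slice_from_one]
  set D := (PySem.List.enumerate price).foldl
      (fun d p => d.modify p.2 [] (fun l => l ++ [p.1]))
      (PySem.Dict.empty : PySem.Dict Int (List Int)) with hD
  have hDmap : D = ((PySem.List.enumerate price).map Prod.swap).foldl
      (fun d p => d.modify p.1 [] (fun l => l ++ [p.2])) PySem.Dict.empty := by
    rw [hD, List.foldl_map]
    rfl
  have hpos : ∀ v, D.getD v [] = occI price v := by
    intro v
    rw [hDmap, PySem.Dict.getD_foldl_modify_append]
    simp only [PySem.Dict.getD_empty, List.nil_append, List.filter_map, List.map_map]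
    rfl
  have hkeys : D.keys = PySem.Set.ofList price := by
    rw [hDmap, PySem.Dict.keys_foldl_modify_key ((PySem.List.enumerate price).map Prod.swap)
        (fun p => p.1) [] (fun _ p => (fun l => l ++ [p.2])) PySem.Dict.empty]
    simp only [List.map_map]
    have h : List.map ((fun (p : Int × Int) => p.1) ∘ Prod.swap) (PySem.List.enumerate price) = price := by
      show List.map (fun (p : Int × Int) => p.2) (PySem.List.enumerate price) = price
      exact PySem.List.map_snd_enumerate price 0
    rw [h]
    exact PySem.Set.update_empty price
  have hnodup : D.keys.Nodup := by
    rw [hkeys]; exact PySem.Set.nodup_ofList price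
  rw [PySem.Dict.values_eq_map_keys D hnodup [], hkeys, List.foldl_map]
  have houter : (PySem.Set.ofList price).foldl
      (fun best v => ((D.getD v []).zip (D.getD v []).tail).foldl (fun best pc =>
        (match best with
          | none => some (PySem.List.pyGetD (pfxL price) (pc.2 + 1) 0 -
              PySem.List.pyGetD (pfxL price) pc.1 0)
          | some b => if (PySem.List.pyGetD (pfxL price) (pc.2 + 1) 0 -
              PySem.List.pyGetD (pfxL price) pc.1 0) < b
            then some (PySem.List.pyGetD (pfxL price) (pc.2 + 1) 0 -
              PySem.List.pyGetD (pfxL price) pc.1 0)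
            else some b)) best) none
    = (PySem.Set.ofList price).foldl
      (fun best v => (cpairs (occI price v)).foldl (fun best pc => ominS best (pcost price pc)) best) none := by
    refine PySem.List.foldl_congr_mem _ _ _ _ ?_
    intro acc v _
    rw [hpos v]
    show (cpairs (occI price v)).foldl _ acc = _
    refine PySem.List.foldl_congr_mem _ _ _ _ ?_
    intro b pc hpc
    obtain ⟨a1, a2⟩ := pc
    have hmem := mem_cpairs_mem _ _ hpc
    obtain ⟨j1, hj1, hj1l⟩ := occI_mem_spec price v a1 (by simpa using hmem.1)
    obtain ⟨j2, hj2, hj2l⟩ := occI_mem_spec price v a2 (by simpa using hmem.2)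
    have hlt : a1 < a2 := mem_cpairs_lt _ (occI_pairwise price v) (a1, a2) hpc
    have hc : PySem.List.pyGetD (pfxL price) (a2 + 1) 0 -
        PySem.List.pyGetD (pfxL price) a1 0 = pcost price (a1, a2) := by
      rw [pfxL_read price (a2 + 1) (by omega) (by omega),
          pfxL_read price a1 (by omega) (by omega)]
      have h := pcost_eq_sub price a1 a2 (by omega) (by omega)
      rw [show (a2 + 1).toNat = a2.toNat + 1 by omega]
      omega
    rw [hc]
    exact innerB_eq b (pcost price (a1, a2))
  rw [houter]
  show retI _ = retI _
  congr 1
  rw [List.foldl_map]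
  unfold gpairs
  rw [List.foldl_flatMap]


-- ===== VERDICT (by name: the statement is the Claim_ definition above) =====
theorem find_min_price_spec : Claim_equal_find_min_price := by
  intro price _
  unfold Spec_find_min_price
  rw [A_eq, B_eq]
  haveI : RightCommutative ominS := ⟨by
    intro a b c
    cases a <;> simp [ominS, pyMinInf] <;> omega⟩
  exact congrArg retI (List.Perm.foldl_eq ((ipairs_perm_gpairs price).map (pcost price)) none)
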